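-- pv_equiv track=rewrite | github.com/vinifm/42_python-django_minipiscine | d01/ex05/all_in.py | display_state
-- ===== SOURCE A (Python) =====
-- def display_state(capital):
-- 	states = {
-- 	"Oregon" : "OR",
-- 	"Alabama" : "AL",
-- 	"New Jersey": "NJ",
-- 	"Colorado" : "CO"
-- 	}
--
-- 	capital_cities = {
-- 	"OR": "Salem",
-- 	"AL": "Montgomery",
-- 	"NJ": "Trenton",
-- 	"CO": "Denver"
-- 	}
--
-- 	if capital not in capital_cities.values():
-- 		return
-- 	for key, val in capital_cities.items():
-- 		if capital == val:
-- 			state_abbr = key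
-- 	for key, val in states.items():
-- 		if state_abbr == val:
-- 			return key
-- ===== SOURCE B (Python) =====
-- def display_state(capital):
--     capital_to_state = {
--         "Salem": "Oregon",
--         "Montgomery": "Alabama",
--         "Trenton": "New Jersey",
--         "Denver": "Colorado",
--     }
--     return capital_to_state.get(capital)
-- ===== Notes on version B (the rewrite author's own statement) =====
-- stated objective: simpler
-- what changed: Merges the two chained dicts (state->abbr and abbr->capital) into one direct capital->state table and returns a single .get, removing the membership guard and both scan loops.
import Mathlib
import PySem

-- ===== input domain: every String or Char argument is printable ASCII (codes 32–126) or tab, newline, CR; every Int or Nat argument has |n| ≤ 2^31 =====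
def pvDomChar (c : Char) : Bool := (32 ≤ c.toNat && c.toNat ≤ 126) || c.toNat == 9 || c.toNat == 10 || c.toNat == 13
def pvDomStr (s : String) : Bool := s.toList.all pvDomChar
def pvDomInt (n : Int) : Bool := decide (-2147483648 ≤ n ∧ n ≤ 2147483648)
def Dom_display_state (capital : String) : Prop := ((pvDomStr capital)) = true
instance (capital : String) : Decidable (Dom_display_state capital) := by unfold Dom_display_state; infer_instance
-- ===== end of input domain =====

-- B merges A's two chained dicts into one direct capital->state table with a single lookup (simpler).


-- ===== PORT A =====
-- second for-loop of A: return the first state whose abbreviation equals state_abbr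
def display_state_loop2 (items : List (String × String)) (abbr : Option String) : Option String :=
  match items with
  | [] => none
  | (k, v) :: rest => if abbr == some v then some k else display_state_loop2 rest abbr

def display_state (capital : String) : Option String :=
  let states : PySem.Dict String String :=
    PySem.Dict.ofList [("Oregon", "OR"), ("Alabama", "AL"), ("New Jersey", "NJ"), ("Colorado", "CO")]
  let capital_cities : PySem.Dict String String :=
    PySem.Dict.ofList [("OR", "Salem"), ("AL", "Montgomery"), ("NJ", "Trenton"), ("CO", "Denver")]
  if !(capital_cities.values.contains capital) then none
  else
    -- first for-loop: state_abbr := last key whose value equals capital (none = unbound; guard ensures bound)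
    let state_abbr : Option String :=
      capital_cities.items.foldl (fun acc kv => if capital == kv.2 then some kv.1 else acc) none
    display_state_loop2 states.items state_abbr

-- ===== PORT B =====
def display_state_alt (capital : String) : Option String :=
  let capital_to_state : PySem.Dict String String :=
    PySem.Dict.ofList [("Salem", "Oregon"), ("Montgomery", "Alabama"), ("Trenton", "New Jersey"), ("Denver", "Colorado")]
  capital_to_state.get? capital

-- ===== PRECONDITION & SPEC =====
def Spec_display_state (capital : String) (out : Option String) : Prop := out = display_state_alt capital
instance (capital : String) (out : Option String) : Decidable (Spec_display_state capital out) := by unfold Spec_display_state; infer_instance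

-- ===== CLAIM (what is proved, stated in full; the proofs are below) =====
def Claim_equal_display_state : Prop := ∀ (capital : String), Dom_display_state capital → Spec_display_state capital (display_state capital)

-- ===== LEMMAS AND PROOFS =====

-- ===== VERDICT (by name: the statement is the Claim_ definition above) =====
theorem display_state_spec : Claim_equal_display_state := by
  intro capital _
  unfold Spec_display_state
  by_cases h1 : capital = "Salem"
  · subst h1; decide
  by_cases h2 : capital = "Montgomery"
  · subst h2; decide
  by_cases h3 : capital = "Trenton"
  · subst h3; decide
  by_cases h4 : capital = "Denver"
  · subst h4; decide
  have e1 : (("Salem" : String) == capital) = false := by simp [Ne.symm h1]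
  have e2 : (("Montgomery" : String) == capital) = false := by simp [Ne.symm h2]
  have e3 : (("Trenton" : String) == capital) = false := by simp [Ne.symm h3]
  have e4 : (("Denver" : String) == capital) = false := by simp [Ne.symm h4]
  simp [display_state, display_state_alt, PySem.Dict.get?, PySem.Dict.values,
        PySem.Dict.contains, PySem.Dict.ofList, PySem.Dict.update, PySem.Dict.insert,
        PySem.Dict.empty, List.find?, beq_iff_eq, h1, h2, h3, h4, e1, e2, e3, e4]
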